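-- pv_equiv track=rewrite | github.com/schemaorg/schemaorg | lib/rdflib/plugins/parsers/pyRdfa/extras/httpheader.py | _split_at_qfactor
-- ===== SOURCE A (Python) =====
-- LWS = ' \t\n\r'  # linear white space
--
-- def _split_at_qfactor( s ):
--     """Splits a string at the quality factor (;q=) parameter.
--
--     Returns the left and right substrings as a two-member tuple.
--
--     """
--     # It may be faster, but incorrect, to use s.split(';q=',1), since
--     # HTTP allows any amount of linear white space (LWS) to appear
--     # between the parts, so it could also be "; q = ".
--
--     # We do this parsing 'manually' for speed rather than using a
--     # regex, which would be r';[ \t\r\n]*q[ \t\r\n]*=[ \t\r\n]*'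
--
--     pos = 0
--     while 0 <= pos < len(s):
--         pos = s.find(';', pos)
--         if pos < 0:
--             break # no more parameters
--         startpos = pos
--         pos = pos + 1
--         while pos < len(s) and s[pos] in LWS:
--             pos = pos + 1
--         if pos < len(s) and s[pos] == 'q':
--             pos = pos + 1
--             while pos < len(s) and s[pos] in LWS:
--                 pos = pos + 1
--             if pos < len(s) and s[pos] == '=':
--                 pos = pos + 1
--                 while pos < len(s) and s[pos] in LWS:
--                     pos = pos + 1
--                 return ( s[:startpos], s[pos:] )
--     return (s, '')
-- ===== SOURCE B (Python) =====
-- import re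
--
-- # The regex the original comment names; re.search's leftmost match with greedy
-- # LWS stars reproduces the manual scan exactly.
-- _QFACTOR_RE = re.compile(r';[ \t\r\n]*q[ \t\r\n]*=[ \t\r\n]*')
--
-- def _split_at_qfactor(s):
--     """Splits a string at the quality factor (;q=) parameter.
--
--     Returns the left and right substrings as a two-member tuple.
--
--     """
--     m = _QFACTOR_RE.search(s)
--     if m is None:
--         return (s, '')
--     return (s[:m.start()], s[m.end():])
-- ===== Notes on version B (the rewrite author's own statement) =====
-- stated objective: idiomatic
-- what changed: Replaces the hand-rolled find/scan state machine with a single compiled-regex re.search (semicolon, then optional linear whitespace around 'q' and '='), splitting the string at the leftmost match.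
import Mathlib
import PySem

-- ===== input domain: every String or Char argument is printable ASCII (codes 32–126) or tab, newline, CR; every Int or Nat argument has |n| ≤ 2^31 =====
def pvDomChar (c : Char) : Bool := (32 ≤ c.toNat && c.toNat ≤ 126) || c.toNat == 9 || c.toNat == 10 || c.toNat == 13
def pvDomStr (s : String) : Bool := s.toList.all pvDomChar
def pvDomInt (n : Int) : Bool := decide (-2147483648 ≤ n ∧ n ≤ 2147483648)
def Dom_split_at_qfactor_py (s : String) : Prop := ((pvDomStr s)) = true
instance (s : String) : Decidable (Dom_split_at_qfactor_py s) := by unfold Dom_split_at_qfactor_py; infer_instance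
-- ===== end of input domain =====

-- B replaces A's hand-rolled scanning state machine by the regex search the original comment
-- names (leftmost match of ';[ \t\r\n]*q[ \t\r\n]*=[ \t\r\n]*'); objective: idiomatic.

-- ===== PORT A =====
-- LWS = ' \t\n\r'
def pvLWS_A : List Char := [' ', '\t', '\n', '\r']

-- 'while pos < len(s) and s[pos] in LWS: pos = pos + 1' (pos is provably ≥ 0, so Nat)
def pvSkipA (cs : List Char) (pos : Nat) : Nat :=
  if h : pos < cs.length then
    if cs[pos] ∈ pvLWS_A then pvSkipA cs (pos + 1) else pos
  else pos
termination_by cs.length - pos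

-- termination helpers for pvALoop (cited in decreasing_by)
lemma pvSkipA_ge (cs : List Char) (pos : Nat) : pos ≤ pvSkipA cs pos := by
  fun_induction pvSkipA cs pos <;> omega

lemma pvFindGo_ge (cs : List Char) (k : Nat) :
    PySem.Chars.find.go [';'] cs k = -1 ∨ (k : Int) ≤ PySem.Chars.find.go [';'] cs k := by
  induction cs generalizing k with
  | nil => left; simp [PySem.Chars.find.go]
  | cons c t ih =>
    rw [PySem.Chars.find.go]
    split
    · right; omega
    · rcases ih (k + 1) with h | h
      · left; exact h
      · right; omega

lemma pvFindFrom_ge (cs : List Char) (pos : Nat)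
    (h0 : 0 ≤ PySem.Chars.findFrom cs [';'] (pos : Int)) :
    (pos : Int) ≤ PySem.Chars.findFrom cs [';'] (pos : Int) := by
  unfold PySem.Chars.findFrom at h0 ⊢
  simp only [PySem.Chars.find] at h0 ⊢
  rw [if_neg (by omega : ¬ (pos : Int) < 0)] at h0 ⊢
  split_ifs at h0 ⊢ with h1 h2
  · omega
  · omega
  · rcases pvFindGo_ge (List.drop ((pos : Int)).toNat (List.take ((cs.length : Int)).toNat cs)) 0 with h | h
    · exact absurd h h2
    · omega

-- the outer 'while 0 <= pos < len(s)' loop of A; returns (startpos, pos) at the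
-- 'return ( s[:startpos], s[pos:] )' line, none when the loop falls through
def pvALoop (cs : List Char) (pos : Nat) : Option (Nat × Nat) :=
  if h : pos < cs.length then
    -- pos = s.find(';', pos); if pos < 0: break
    if hf : PySem.Chars.findFrom cs [';'] (pos : Int) < 0 then none
    else
      -- startpos = pos; pos = pos + 1; skip LWS
      let st := (PySem.Chars.findFrom cs [';'] (pos : Int)).toNat
      let p1 := pvSkipA cs (st + 1)
      if hq : p1 < cs.length then
        if cs[p1] = 'q' then
          let p2 := pvSkipA cs (p1 + 1)
          if he : p2 < cs.length then
            if cs[p2] = '=' then some (st, pvSkipA cs (p2 + 1))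
            else pvALoop cs p2
          else pvALoop cs p2
        else pvALoop cs p1
      else pvALoop cs p1
  else none
termination_by cs.length - pos
decreasing_by
  all_goals
    (have hge : (pos : Int) ≤ PySem.Chars.findFrom cs [';'] (pos : Int) :=
      pvFindFrom_ge cs pos (by omega)
     have h1 := pvSkipA_ge cs ((PySem.Chars.findFrom cs [';'] (pos : Int)).toNat + 1)
     have h2 := pvSkipA_ge cs (pvSkipA cs ((PySem.Chars.findFrom cs [';'] (pos : Int)).toNat + 1) + 1)
     omega)

def split_at_qfactor_py (s : String) : String × String :=
  match pvALoop s.toList 0 with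
  | some (st, en) =>
      -- return ( s[:startpos], s[pos:] )
      (String.ofList (PySem.List.slice s.toList none (some (st : Int))),
       String.ofList (PySem.List.slice s.toList (some (en : Int)) none))
  | none => (s, "")  -- return (s, '')

-- ===== PORT B =====
-- character class [ \t\r\n] of the regex
def pvIsLWS (c : Char) : Bool := c == ' ' || c == '\t' || c == '\r' || c == '\n'

-- hand port (exact) of matching the compiled regex ';[ \t\r\n]*q[ \t\r\n]*=[ \t\r\n]*' at the
-- head of cs: each greedy class-star is maximal-munch dropWhile — exact, because the class is
-- disjoint from the literal that follows it, so the engine never backtracks into a star;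
-- returns the suffix after the match (what follows m.end())
def pvQfMatch (cs : List Char) : Option (List Char) :=
  match cs with
  | [] => none
  | c :: r1 =>
    if c = ';' then
      match r1.dropWhile pvIsLWS with
      | [] => none
      | c2 :: r2 =>
        if c2 = 'q' then
          match r2.dropWhile pvIsLWS with
          | [] => none
          | c3 :: r3 => if c3 = '=' then some (r3.dropWhile pvIsLWS) else none
        else none
    else none

-- re.search: try positions left to right, first (leftmost) match wins;
-- returns (characters before m.start(), characters from m.end())
def pvQfSearch (cs : List Char) : Option (List Char × List Char) :=
  match pvQfMatch cs with
  | some r => some ([], r)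
  | none =>
    match cs with
    | [] => none
    | c :: t => (pvQfSearch t).map (fun p => (c :: p.1, p.2))

def split_at_qfactor_py_alt (s : String) : String × String :=
  match pvQfSearch s.toList with
  | some (l, r) => (String.ofList l, String.ofList r)
  | none => (s, "")

-- ===== PRECONDITION & SPEC =====
def Spec_split_at_qfactor_py (s : String) (out : String × String) : Prop := out = split_at_qfactor_py_alt s
instance (s : String) (out : String × String) : Decidable (Spec_split_at_qfactor_py s out) := by unfold Spec_split_at_qfactor_py; infer_instance

-- ===== CLAIM (what is proved, stated in full; the proofs are below) =====
def Claim_equal_split_at_qfactor_py : Prop := ∀ (s : String), Dom_split_at_qfactor_py s → Spec_split_at_qfactor_py s (split_at_qfactor_py s)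

-- ===== LEMMAS AND PROOFS =====

-- loop invariant: o is A's verdict about the region at or after pos — none means no match
-- starts there; some (st, en) means the first match starts at st and leaves suffix drop en
def pvSpecAt (cs : List Char) (pos : Nat) (o : Option (Nat × Nat)) : Prop :=
  (o = none → ∀ i : Nat, pos ≤ i → pvQfMatch (cs.drop i) = none) ∧
  (∀ st en, o = some (st, en) →
    pos ≤ st ∧ pvQfMatch (cs.drop st) = some (cs.drop en) ∧
    ∀ i : Nat, pos ≤ i → i < st → pvQfMatch (cs.drop i) = none)

lemma pvLWS_iff (c : Char) : c ∈ pvLWS_A ↔ pvIsLWS c = true := by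
  simp [pvLWS_A, pvIsLWS]
  tauto

lemma pvIsLWS_ne_semi {c : Char} (h : pvIsLWS c = true) : c ≠ ';' := by
  intro he
  subst he
  exact absurd h (by decide)

-- a position whose character is not ';' (or past the end) cannot start a match
lemma pvQfMatch_none_of_ne {cs : List Char} {i : Nat} (h : cs[i]? ≠ some ';') :
    pvQfMatch (cs.drop i) = none := by
  by_cases hi : i < cs.length
  · rw [List.drop_eq_getElem_cons hi]
    have hne : ¬ cs[i] = ';' := fun he => h (by rw [List.getElem?_eq_getElem hi, he])
    simp [pvQfMatch, hne]
  · rw [List.drop_of_length_le (by omega)]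
    rfl

-- find.go characterization: -1 and no ';', or the index of the first ';'
lemma pvFindGo_spec (cs : List Char) (k : Nat) :
    (PySem.Chars.find.go [';'] cs k = -1 ∧ ∀ j : Nat, cs[j]? ≠ some ';') ∨
    (∃ j : Nat, PySem.Chars.find.go [';'] cs k = (k : Int) + j ∧ cs[j]? = some ';' ∧
      ∀ i, i < j → cs[i]? ≠ some ';') := by
  induction cs generalizing k with
  | nil =>
    left
    refine ⟨by simp [PySem.Chars.find.go], by intro j; simp⟩
  | cons c t ih =>
    rw [PySem.Chars.find.go]
    by_cases hc : c = ';'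
    · right
      refine ⟨0, ?_, by simp [hc], by omega⟩
      subst hc
      simp [List.isPrefixOf]
    · have hpre : [';'].isPrefixOf (c :: t) = false := by
        simp [List.isPrefixOf]
        exact fun he => hc he.symm
      rw [hpre]
      simp only [Bool.false_eq_true, if_false]
      rcases ih (k + 1) with ⟨h1, h2⟩ | ⟨j, h1, h2, h3⟩
      · left
        refine ⟨h1, ?_⟩
        intro j
        cases j with
        | zero => simp [hc]
        | succ j => simpa using h2 j
      · right
        refine ⟨j + 1, by push_cast [h1]; omega, by simpa using h2, ?_⟩
        intro i hi
        cases i with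
        | zero => simp [hc]
        | succ i => simpa using h3 i (by omega)

-- s.find(';', pos) for 0 ≤ pos ≤ len(s): -1 and no ';' at or after pos, or the
-- index of the first ';' at or after pos
lemma pvFindFrom_spec (cs : List Char) (pos : Nat) (hp : pos ≤ cs.length) :
    (PySem.Chars.findFrom cs [';'] (pos : Int) = -1 ∧
      ∀ i : Nat, pos ≤ i → cs[i]? ≠ some ';') ∨
    (∃ st : Nat, PySem.Chars.findFrom cs [';'] (pos : Int) = (st : Int) ∧ pos ≤ st ∧
      cs[st]? = some ';' ∧ ∀ i : Nat, pos ≤ i → i < st → cs[i]? ≠ some ';') := by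
  unfold PySem.Chars.findFrom
  simp only [PySem.Chars.find]
  rw [if_neg (by omega : ¬ (pos : Int) < 0),
    if_neg (by omega : ¬ (cs.length : Int) < (pos : Int)),
    show ((pos : Int)).toNat = pos from by omega,
    show ((cs.length : Int)).toNat = cs.length from by omega,
    List.take_length]
  rcases pvFindGo_spec (cs.drop pos) 0 with ⟨h1, h2⟩ | ⟨j, h1, h2, h3⟩
  · rw [h1, if_pos rfl]
    left
    refine ⟨rfl, ?_⟩
    intro i hi hc
    refine h2 (i - pos) ?_
    rw [List.getElem?_drop, show pos + (i - pos) = i from by omega]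
    exact hc
  · rw [h1, if_neg (show ¬ (((0 : Nat) : Int) + (j : Int) = -1) by push_cast; omega)]
    right
    refine ⟨pos + j, by push_cast; omega, by omega, ?_, ?_⟩
    · rw [← List.getElem?_drop]
      exact h2
    · intro i hi1 hi2 hc
      refine h3 (i - pos) (by omega) ?_
      rw [List.getElem?_drop, show pos + (i - pos) = i from by omega]
      exact hc

-- the LWS-skip loop lands exactly where dropWhile lands, and skips only LWS characters
lemma pvSkipA_spec (cs : List Char) (pos : Nat) :
    cs.drop (pvSkipA cs pos) = (cs.drop pos).dropWhile pvIsLWS ∧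
    ∀ i : Nat, pos ≤ i → i < pvSkipA cs pos → ∃ c, cs[i]? = some c ∧ pvIsLWS c = true := by
  fun_induction pvSkipA cs pos with
  | case1 pos h hl ih =>
    rcases ih with ⟨ih1, ih2⟩
    refine ⟨?_, ?_⟩
    · rw [ih1, List.drop_eq_getElem_cons h, List.dropWhile_cons,
        if_pos ((pvLWS_iff _).mp hl)]
    · intro i hi1 hi2
      rcases Nat.eq_or_lt_of_le hi1 with he | hlt
      · exact ⟨cs[pos], by rw [← he, List.getElem?_eq_getElem h], (pvLWS_iff _).mp hl⟩
      · exact ih2 i hlt hi2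
  | case2 pos h hl =>
    refine ⟨?_, ?_⟩
    · rw [List.drop_eq_getElem_cons h, List.dropWhile_cons,
        if_neg (fun hc => hl ((pvLWS_iff _).mpr hc))]
    · intro i hi1 hi2
      omega
  | case3 pos h =>
    refine ⟨?_, ?_⟩
    · rw [List.drop_of_length_le (by omega)]
      rfl
    · intro i hi1 hi2
      omega

lemma pvSkipA_lws {cs : List Char} {a i : Nat} (h1 : a ≤ i) (h2 : i < pvSkipA cs a) :
    pvQfMatch (cs.drop i) = none := by
  rcases (pvSkipA_spec cs a).2 i h1 h2 with ⟨c, hc, hlws⟩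
  refine pvQfMatch_none_of_ne ?_
  rw [hc]
  intro he
  exact pvIsLWS_ne_semi hlws (by injection he)

-- attempting the match at a ';' whose q-position check fails yields no match,
-- nor does any LWS position skipped on the way
lemma pvMatch_fail_q {cs : List Char} {st : Nat} (hst : st < cs.length)
    (hsemi : cs[st] = ';') (hq : cs[pvSkipA cs (st + 1)]? ≠ some 'q') :
    ∀ i : Nat, st ≤ i → i < pvSkipA cs (st + 1) → pvQfMatch (cs.drop i) = none := by
  intro i hi1 hi2
  rcases Nat.eq_or_lt_of_le hi1 with he | hlt
  · rw [← he] at hi2 ⊢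
    rw [List.drop_eq_getElem_cons hst, hsemi]
    have hk1 := (pvSkipA_spec cs (st + 1)).1
    rcases hd : cs.drop (pvSkipA cs (st + 1)) with _ | ⟨c2, r2⟩
    · rw [hd] at hk1
      simp [pvQfMatch, ← hk1]
    · rw [hd] at hk1
      have hc2 : cs[pvSkipA cs (st + 1)]? = some c2 := by
        rw [← List.head?_drop, hd]
        rfl
      have hq2 : ¬ c2 = 'q' := fun he2 => hq (by rw [hc2, he2])
      simp [pvQfMatch, ← hk1, hq2]
  · exact pvSkipA_lws (by omega) hi2

-- same when the '='-position check fails after a successful 'q'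
lemma pvMatch_fail_eq {cs : List Char} {st p1 : Nat} (hst : st < cs.length)
    (hsemi : cs[st] = ';') (hp1 : p1 = pvSkipA cs (st + 1)) (hq1 : p1 < cs.length)
    (hq2 : cs[p1] = 'q') (he : cs[pvSkipA cs (p1 + 1)]? ≠ some '=') :
    ∀ i : Nat, st ≤ i → i < pvSkipA cs (p1 + 1) → pvQfMatch (cs.drop i) = none := by
  have hp1le : st + 1 ≤ p1 := hp1 ▸ pvSkipA_ge cs (st + 1)
  intro i hi1 hi2
  rcases Nat.eq_or_lt_of_le hi1 with he0 | hlt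
  · rw [← he0] at hi2 ⊢
    rw [List.drop_eq_getElem_cons hst, hsemi]
    have hk1 := (pvSkipA_spec cs (st + 1)).1
    rw [← hp1, List.drop_eq_getElem_cons hq1, hq2] at hk1
    have hk2 := (pvSkipA_spec cs (p1 + 1)).1
    rcases hd : cs.drop (pvSkipA cs (p1 + 1)) with _ | ⟨c3, r3⟩
    · rw [hd] at hk2
      simp [pvQfMatch, ← hk1, ← hk2]
    · rw [hd] at hk2
      have hc3 : cs[pvSkipA cs (p1 + 1)]? = some c3 := by
        rw [← List.head?_drop, hd]
        rfl
      have hne3 : ¬ c3 = '=' := fun h3 => he (by rw [hc3, h3])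
      simp [pvQfMatch, ← hk1, ← hk2, hne3]
  · by_cases hcmp : i < p1
    · exact pvSkipA_lws (a := st + 1) (by omega) (by omega)
    · rcases Nat.eq_or_lt_of_le (show p1 ≤ i by omega) with he1 | hlt1
      · rw [← he1]
        refine pvQfMatch_none_of_ne ?_
        rw [List.getElem?_eq_getElem hq1, hq2]
        intro hcon
        exact absurd (by injection hcon) (by decide : ¬ ('q' : Char) = ';')
      · exact pvSkipA_lws (by omega) hi2

-- monotone weakening of the loop invariant: extend the no-match range to the left
lemma pvSpecAt_mono (cs : List Char) (pos p : Nat) (o : Option (Nat × Nat)) (hpp : pos ≤ p)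
    (hno : ∀ i : Nat, pos ≤ i → i < p → pvQfMatch (cs.drop i) = none)
    (ih : pvSpecAt cs p o) : pvSpecAt cs pos o := by
  rcases ih with ⟨ih1, ih2⟩
  refine ⟨?_, ?_⟩
  · intro ho i hi
    by_cases hcmp : i < p
    · exact hno i hi hcmp
    · exact ih1 ho i (by omega)
  · intro st en ho
    rcases ih2 st en ho with ⟨h1, h2, h3⟩
    refine ⟨by omega, h2, ?_⟩
    intro i hi1 hi2
    by_cases hcmp : i < p
    · exact hno i hi1 hcmp
    · exact h3 i (by omega) hi2

-- A's loop satisfies the invariant: none means no match at or after pos; some (st, en)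
-- means the first match at or after pos starts at st and the remaining text is drop en
lemma pvALoop_spec (cs : List Char) (pos : Nat) : pvSpecAt cs pos (pvALoop cs pos) := by
  fun_induction pvALoop cs pos with
  | case1 pos h hf =>
    rcases pvFindFrom_spec cs pos (by omega) with ⟨h1, h2⟩ | ⟨st, h1, _, _, _⟩
    · exact ⟨fun _ i hi => pvQfMatch_none_of_ne (h2 i hi),
        fun st en hcon => absurd hcon (by simp)⟩
    · rw [h1] at hf
      omega
  | case2 pos h hf st p1 hq1 hq2 p2 he1 he2 =>
    rcases pvFindFrom_spec cs pos (by omega) with ⟨h1, _⟩ | ⟨st', h1, hle, hsemi, hmin⟩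
    · rw [h1] at hf
      omega
    have hstd : st = (PySem.Chars.findFrom cs [';'] (pos : Int)).toNat := rfl
    have hstv : st = st' := by rw [hstd, h1]; omega
    rw [← hstv] at hle hsemi hmin
    have hp1d : p1 = pvSkipA cs (st + 1) := rfl
    have hp2d : p2 = pvSkipA cs (p1 + 1) := rfl
    have hstlen : st < cs.length := by
      by_contra hc
      rw [List.getElem?_eq_none (by omega : cs.length ≤ st)] at hsemi
      exact absurd hsemi (by simp)
    refine ⟨fun hcon => absurd hcon (by simp), ?_⟩
    intro st0 en0 hs
    have hs1 : st0 = st := by injection hs with hs'; injection hs' with h1 h2; omega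
    have hs2 : en0 = pvSkipA cs (p2 + 1) := by injection hs with hs'; injection hs' with h1 h2; omega
    subst hs1
    subst hs2
    refine ⟨by omega, ?_, fun i hi1 hi2 => pvQfMatch_none_of_ne (hmin i hi1 (by omega))⟩
    have hsemi' : cs[st] = ';' := by
      rw [List.getElem?_eq_getElem hstlen] at hsemi
      injection hsemi
    have hk1 := (pvSkipA_spec cs (st + 1)).1
    rw [← hp1d, List.drop_eq_getElem_cons hq1, hq2] at hk1
    have hk2 := (pvSkipA_spec cs (p1 + 1)).1
    rw [← hp2d, List.drop_eq_getElem_cons he1, he2] at hk2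
    have hk3 := (pvSkipA_spec cs (p2 + 1)).1
    rw [List.drop_eq_getElem_cons hstlen, hsemi']
    simp [pvQfMatch, ← hk1, ← hk2, ← hk3]
  | case3 pos h hf st p1 hq1 hq2 p2 he1 he2 ih =>
    rcases pvFindFrom_spec cs pos (by omega) with ⟨h1, _⟩ | ⟨st', h1, hle, hsemi, hmin⟩
    · rw [h1] at hf
      omega
    have hstd : st = (PySem.Chars.findFrom cs [';'] (pos : Int)).toNat := rfl
    have hstv : st = st' := by rw [hstd, h1]; omega
    rw [← hstv] at hle hsemi hmin
    have hstlen : st < cs.length := by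
      by_contra hc
      rw [List.getElem?_eq_none (by omega : cs.length ≤ st)] at hsemi
      exact absurd hsemi (by simp)
    have hsemi' : cs[st] = ';' := by
      rw [List.getElem?_eq_getElem hstlen] at hsemi
      injection hsemi
    have hfail := pvMatch_fail_eq hstlen hsemi' (rfl : p1 = pvSkipA cs (st + 1)) hq1 hq2
      (by rw [List.getElem?_eq_getElem he1]; intro hc; exact he2 (by injection hc))
    refine pvSpecAt_mono cs pos p2 _ (by have := pvSkipA_ge cs (st + 1); have := pvSkipA_ge cs (p1 + 1); omega) ?_ ih
    intro i hi1 hi2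
    by_cases hcmp : i < st
    · exact pvQfMatch_none_of_ne (hmin i hi1 (by omega))
    · exact hfail i (by omega) hi2
  | case4 pos h hf st p1 hq1 hq2 p2 hne ih =>
    rcases pvFindFrom_spec cs pos (by omega) with ⟨h1, _⟩ | ⟨st', h1, hle, hsemi, hmin⟩
    · rw [h1] at hf
      omega
    have hstd : st = (PySem.Chars.findFrom cs [';'] (pos : Int)).toNat := rfl
    have hstv : st = st' := by rw [hstd, h1]; omega
    rw [← hstv] at hle hsemi hmin
    have hstlen : st < cs.length := by
      by_contra hc
      rw [List.getElem?_eq_none (by omega : cs.length ≤ st)] at hsemi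
      exact absurd hsemi (by simp)
    have hsemi' : cs[st] = ';' := by
      rw [List.getElem?_eq_getElem hstlen] at hsemi
      injection hsemi
    have hfail := pvMatch_fail_eq hstlen hsemi' (rfl : p1 = pvSkipA cs (st + 1)) hq1 hq2
      (by rw [List.getElem?_eq_none (by omega)]; simp)
    refine pvSpecAt_mono cs pos p2 _ (by have := pvSkipA_ge cs (st + 1); have := pvSkipA_ge cs (p1 + 1); omega) ?_ ih
    intro i hi1 hi2
    by_cases hcmp : i < st
    · exact pvQfMatch_none_of_ne (hmin i hi1 (by omega))
    · exact hfail i (by omega) hi2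
  | case5 pos h hf st p1 hq1 hq2 ih =>
    rcases pvFindFrom_spec cs pos (by omega) with ⟨h1, _⟩ | ⟨st', h1, hle, hsemi, hmin⟩
    · rw [h1] at hf
      omega
    have hstd : st = (PySem.Chars.findFrom cs [';'] (pos : Int)).toNat := rfl
    have hstv : st = st' := by rw [hstd, h1]; omega
    rw [← hstv] at hle hsemi hmin
    have hstlen : st < cs.length := by
      by_contra hc
      rw [List.getElem?_eq_none (by omega : cs.length ≤ st)] at hsemi
      exact absurd hsemi (by simp)
    have hsemi' : cs[st] = ';' := by
      rw [List.getElem?_eq_getElem hstlen] at hsemi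
      injection hsemi
    have hfail := pvMatch_fail_q hstlen hsemi'
      (by rw [show pvSkipA cs (st + 1) = p1 from rfl, List.getElem?_eq_getElem hq1]
          intro hc
          exact hq2 (by injection hc))
    refine pvSpecAt_mono cs pos p1 _ (by have := pvSkipA_ge cs (st + 1); omega) ?_ ih
    intro i hi1 hi2
    by_cases hcmp : i < st
    · exact pvQfMatch_none_of_ne (hmin i hi1 (by omega))
    · exact hfail i (by omega) (by rw [show pvSkipA cs (st + 1) = p1 from rfl]; omega)
  | case6 pos h hf st p1 hq1 ih =>
    rcases pvFindFrom_spec cs pos (by omega) with ⟨h1, _⟩ | ⟨st', h1, hle, hsemi, hmin⟩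
    · rw [h1] at hf
      omega
    have hstd : st = (PySem.Chars.findFrom cs [';'] (pos : Int)).toNat := rfl
    have hstv : st = st' := by rw [hstd, h1]; omega
    rw [← hstv] at hle hsemi hmin
    have hstlen : st < cs.length := by
      by_contra hc
      rw [List.getElem?_eq_none (by omega : cs.length ≤ st)] at hsemi
      exact absurd hsemi (by simp)
    have hsemi' : cs[st] = ';' := by
      rw [List.getElem?_eq_getElem hstlen] at hsemi
      injection hsemi
    have hfail := pvMatch_fail_q hstlen hsemi'
      (by rw [show pvSkipA cs (st + 1) = p1 from rfl, List.getElem?_eq_none (by omega)]; simp)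
    refine pvSpecAt_mono cs pos p1 _ (by have := pvSkipA_ge cs (st + 1); omega) ?_ ih
    intro i hi1 hi2
    by_cases hcmp : i < st
    · exact pvQfMatch_none_of_ne (hmin i hi1 (by omega))
    · exact hfail i (by omega) (by rw [show pvSkipA cs (st + 1) = p1 from rfl]; omega)
  | case7 pos h =>
    refine ⟨fun _ i hi => ?_, fun st en hcon => absurd hcon (by simp)⟩
    rw [List.drop_of_length_le (by omega)]
    rfl

-- B's search: none means no match anywhere
lemma pvQfSearch_none (cs : List Char) (h : pvQfSearch cs = none) :
    ∀ i : Nat, pvQfMatch (cs.drop i) = none := by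
  induction cs with
  | nil => intro i; simp [pvQfMatch]
  | cons c t ih =>
    intro i
    rw [pvQfSearch] at h
    rcases hm : pvQfMatch (c :: t) with _ | r
    · rw [hm] at h
      simp only [Option.map_eq_none_iff] at h
      cases i with
      | zero => exact hm
      | succ i => exact ih h i
    · rw [hm] at h
      exact absurd h (by simp)

-- B's search: some (l, r) means the leftmost match starts right after prefix l
-- and leaves suffix r
lemma pvQfSearch_some (cs : List Char) (l r : List Char) (h : pvQfSearch cs = some (l, r)) :
    cs.take l.length = l ∧ pvQfMatch (cs.drop l.length) = some r ∧
    ∀ i : Nat, i < l.length → pvQfMatch (cs.drop i) = none := by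
  induction cs generalizing l r with
  | nil =>
    rw [pvQfSearch] at h
    exact absurd h (by simp [pvQfMatch])
  | cons c t ih =>
    rw [pvQfSearch] at h
    rcases hm : pvQfMatch (c :: t) with _ | r0
    · rw [hm] at h
      rcases hs : pvQfSearch t with _ | ⟨l2, r2⟩
      · rw [hs] at h
        exact absurd h (by simp)
      · rw [hs] at h
        simp only [Option.map_some, Option.some_inj] at h
        cases h
        rcases ih l2 r hs with ⟨ih1, ih2, ih3⟩
        refine ⟨by simpa using ih1, by simpa using ih2, ?_⟩
        intro i hi
        cases i with
        | zero => exact hm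
        | succ i => exact ih3 i (by simpa using hi)
    · rw [hm] at h
      simp only [Option.some_inj] at h
      cases h
      exact ⟨rfl, hm, fun i hi => absurd hi (by simp)⟩

-- ===== VERDICT (by name: the statement is the Claim_ definition above) =====
theorem split_at_qfactor_py_spec : Claim_equal_split_at_qfactor_py := by
  intro s _
  unfold Spec_split_at_qfactor_py
  unfold split_at_qfactor_py split_at_qfactor_py_alt
  have hSA := pvALoop_spec s.toList 0
  rcases hA : pvALoop s.toList 0 with _ | ⟨st, en⟩ <;> rw [hA] at hSA <;>
    rcases hB : pvQfSearch s.toList with _ | ⟨l, r⟩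
  · rfl
  · -- A found nothing but B found a match: impossible
    rcases pvQfSearch_some s.toList l r hB with ⟨_, h2, _⟩
    rw [hSA.1 rfl l.length (by omega)] at h2
    exact absurd h2 (by simp)
  · -- B found nothing but A found a match: impossible
    rcases hSA.2 st en rfl with ⟨_, h2, _⟩
    rw [pvQfSearch_none s.toList hB st] at h2
    exact absurd h2 (by simp)
  · -- both found their (leftmost) match: same position, same remainder
    rcases hSA.2 st en rfl with ⟨_, hA2, hA3⟩
    rcases pvQfSearch_some s.toList l r hB with ⟨hB1, hB2, hB3⟩
    have hst : st = l.length := by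
      rcases Nat.lt_trichotomy st l.length with h | h | h
      · rw [hB3 st h] at hA2
        exact absurd hA2 (by simp)
      · exact h
      · rw [hA3 l.length (by omega) h] at hB2
        exact absurd hB2 (by simp)
    subst hst
    rw [hA2] at hB2
    have hr : s.toList.drop en = r := by injection hB2
    simp only [Prod.mk.injEq]
    refine ⟨?_, ?_⟩
    · rw [PySem.List.slice_to_natCast, hB1]
    · rw [PySem.List.slice_from_natCast, hr]
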